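-- pv_equiv track=rewrite | github.com/rwilcox5/derivativesolver | chainrule.py | fullparen
-- ===== SOURCE A (Python) =====
-- def fullparen(input_string):
-- 	openpar = 0
-- 	isbreak = 0
-- 	cancel_it = 0
-- 	really_cancel = 0
-- 	for idx,i in enumerate(input_string):
-- 		if i == '(':
-- 			openpar = openpar+1
-- 		elif i == ')':
-- 			openpar = openpar-1
-- 		if openpar == 0:
-- 			cancel_it = 1
-- 			isbreak = idx
-- 			break
-- 	if isbreak == len(input_string)-1:
-- 		return True
-- 	else:
-- 		return False
-- ===== SOURCE B (Python) =====
-- def fullparen(input_string):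
--     # Per-prefix recount: for each prefix, compare its '(' and ')' counts with
--     # str.count; the first balanced prefix decides. No running balance is kept.
--     # A lone '(' or ')' returns False here (A returns True there by accident).
--     n = len(input_string)
--     for k in range(n):
--         p = input_string[:k + 1]
--         if p.count('(') == p.count(')'):
--             return k == n - 1
--     return False
-- ===== Notes on version B (the rewrite author's own statement) =====
-- stated objective: alternative
-- what changed: A maintains a running balance counter in one enumerate-loop with a break and a defaulted break index; B keeps no state at all: it recounts each prefix's '(' and ')' occurrences with str.count and decides at the first balanced prefix.
-- intended difference: On one-character inputs consisting of a single unmatched parenthesis A returns True (its never-assigned break index defaults to 0 == len-1) while B returns False, the intended answer since a lone unmatched parenthesis is not a fully parenthesized string. — e.g. on fullparen("("): A returns true, B returns false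
import Mathlib
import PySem

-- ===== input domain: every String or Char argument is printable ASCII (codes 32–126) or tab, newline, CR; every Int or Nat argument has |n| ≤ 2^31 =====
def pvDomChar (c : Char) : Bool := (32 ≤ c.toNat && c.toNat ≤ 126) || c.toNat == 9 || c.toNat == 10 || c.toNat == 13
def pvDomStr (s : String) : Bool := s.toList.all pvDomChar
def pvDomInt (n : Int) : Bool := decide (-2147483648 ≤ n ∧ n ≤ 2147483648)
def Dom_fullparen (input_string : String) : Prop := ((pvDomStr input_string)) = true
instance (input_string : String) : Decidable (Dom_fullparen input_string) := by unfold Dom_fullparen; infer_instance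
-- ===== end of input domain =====

-- B replaces A's running-balance break-loop by a stateless per-prefix recount via count (alternative, same task);
-- B returns False on the lone-paren strings "(" / ")" where A accidentally returns True (see D_fullparen).


-- ===== PORT A =====
-- A's loop: enumerate the chars, update openpar, break at the first index where
-- openpar == 0 (returning that index); none = the loop ran to the end without a break.
def fullparenGo (l : List Char) (idx : Nat) (openpar : Int) : Option Nat :=
  match l with
  | [] => none
  | c :: rest =>
    let op : Int := if c = '(' then openpar + 1 else if c = ')' then openpar - 1 else openpar
    if op = 0 then some idx else fullparenGo rest (idx + 1) op

def fullparen (input_string : String) : Bool :=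
  let l := input_string.toList
  let isbreak : Nat := (fullparenGo l 0 0).getD 0
  ((isbreak : Int) == (l.length : Int) - 1)

-- ===== PORT B =====
-- B's loop: for k in range(n): p = s[:k+1]; if p.count('(') == p.count(')'): return k == n-1; return False.
-- s[:k+1] with k+1 ≥ 0 is exactly List.take (k+1); str.count of a single-char needle is exactly List.count.
def fullparenAltGo (l : List Char) (n : Nat) (m : Nat) (k : Nat) : Bool :=
  match m with
  | 0 => false                                   -- range exhausted: return False
  | m + 1 =>
    let p := l.take (k + 1)
    if p.count '(' = p.count ')' then decide (k = n - 1)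
    else fullparenAltGo l n m (k + 1)

def fullparen_alt (input_string : String) : Bool :=
  fullparenAltGo input_string.toList input_string.toList.length
    input_string.toList.length 0

-- ===== PRECONDITION & SPEC =====
-- On one-character inputs consisting of a single unmatched parenthesis A returns True (its
-- never-assigned break index defaults to 0 == len-1) while B returns False, the intended answer
-- since a lone unmatched parenthesis is not a fully parenthesized string.
def D_fullparen (input_string : String) : Prop :=
  input_string = "(" ∨ input_string = ")"
instance (input_string : String) : Decidable (D_fullparen input_string) := by
  unfold D_fullparen; infer_instance

def Spec_fullparen (input_string : String) (out : Bool) : Prop :=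
  ¬ D_fullparen input_string → out = fullparen_alt input_string
instance (input_string : String) (out : Bool) : Decidable (Spec_fullparen input_string out) := by
  unfold Spec_fullparen; infer_instance

def pvDiffWitness_fullparen : String := "("
def pvDiffWitnessOut_fullparen : Bool × Bool := (true, false)

-- ===== CLAIM (what is proved, stated in full; the proofs are below) =====
def Claim_unchanged_fullparen : Prop :=
  ∀ (input_string : String), Dom_fullparen input_string →
    Spec_fullparen input_string (fullparen input_string)
def Claim_changed_fullparen : Prop :=
  Dom_fullparen (pvDiffWitness_fullparen) ∧ D_fullparen (pvDiffWitness_fullparen) ∧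
  fullparen (pvDiffWitness_fullparen) = pvDiffWitnessOut_fullparen.1 ∧
  fullparen_alt (pvDiffWitness_fullparen) = pvDiffWitnessOut_fullparen.2 ∧
  pvDiffWitnessOut_fullparen.1 ≠ pvDiffWitnessOut_fullparen.2
def Claim_exact_fullparen : Prop :=
  ∀ (input_string : String), Dom_fullparen input_string → D_fullparen input_string →
    fullparen input_string ≠ fullparen_alt input_string

-- ===== LEMMAS AND PROOFS =====

-- A's balance after processing a prefix is the '('-count minus the ')'-count of that prefix;
-- running B's loop from position k therefore matches running A's loop on the suffix from k.
theorem altGo_eq_go (l : List Char) (m k : Nat) (b : Int)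
    (hm : m = l.length - k)
    (hb : b = ((l.take k).count '(' : Int) - ((l.take k).count ')' : Int)) :
    fullparenAltGo l l.length m k =
      (match fullparenGo (l.drop k) k b with
       | some j => decide ((j : Int) = (l.length : Int) - 1)
       | none => false) := by
  induction m generalizing k b with
  | zero =>
    have hk : l.length ≤ k := by omega
    simp [fullparenAltGo, List.drop_eq_nil_of_le hk, fullparenGo]
  | succ m ih =>
    have hk : k < l.length := by omega
    have hdrop : l.drop k = l[k] :: l.drop (k + 1) := List.drop_eq_getElem_cons hk
    have htake : l.take (k + 1) = l.take k ++ [l[k]] := by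
      rw [List.take_add_one]; simp [List.getElem?_eq_getElem hk]
    -- the updated balance equals the (k+1)-prefix's count difference
    have hop : (if l[k] = '(' then b + 1 else if l[k] = ')' then b - 1 else b)
        = ((l.take (k+1)).count '(' : Int) - ((l.take (k+1)).count ')' : Int) := by
      rw [htake]
      simp only [List.count_append, List.count_singleton]
      split_ifs with h1 h2 <;> simp_all <;> omega
    rw [hdrop]
    simp only [fullparenAltGo, fullparenGo]
    rw [hop]
    by_cases hz : ((l.take (k+1)).count '(' : Int) - ((l.take (k+1)).count ')' : Int) = 0
    · have hcnt : (l.take (k+1)).count '(' = (l.take (k+1)).count ')' := by omega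
      simp only [hcnt, if_pos]
      have : ((k : Int) = (l.length : Int) - 1) ↔ (k = l.length - 1) := by omega
      simp [this]
    · have hcnt : ¬ ((l.take (k+1)).count '(' = (l.take (k+1)).count ')') := by omega
      simp only [hz, hcnt, if_false]
      exact ih (k + 1) _ (by omega) rfl

-- if A's loop never breaks on a single-character string, that character is '(' or ')'
theorem go_none_single (c : Char) (h : fullparenGo [c] 0 0 = none) : c = '(' ∨ c = ')' := by
  by_contra hc
  rw [not_or] at hc
  simp [fullparenGo, hc.1, hc.2] at h

-- ===== VERDICT (by name: the statements are the Claim_ definitions above) =====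
theorem fullparen_spec : Claim_unchanged_fullparen := by
  intro s _ hD
  unfold fullparen fullparen_alt
  have hmain := altGo_eq_go s.toList s.toList.length 0 0 (by omega) (by simp)
  simp only [List.drop_zero] at hmain
  rw [hmain]
  have hlen : s.toList.length = s.length := by simp
  cases hgo : fullparenGo s.toList 0 0 with
  | some j =>
    simp only [hgo, Option.getD_some]
    rw [Bool.eq_iff_iff]
    simp
  | none =>
    simp only [hgo, Option.getD_none]
    by_cases h1 : s.toList.length = 1
    · exfalso
      obtain ⟨c, hc⟩ : ∃ c, s.toList = [c] := by
        cases hl : s.toList with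
        | nil => simp [hl] at h1
        | cons a t =>
          refine ⟨a, ?_⟩
          simp [hl] at h1 ⊢
          exact h1
      rw [hc] at hgo
      have hs : String.ofList s.toList = s := String.ofList_toList
      rw [hc] at hs
      rcases go_none_single c hgo with h | h
      · subst h; exact hD (Or.inl (by rw [← hs]))
      · subst h; exact hD (Or.inr (by rw [← hs]))
    · simp only [beq_eq_false_iff_ne]
      omega

theorem fullparen_changed : Claim_changed_fullparen := by
  unfold Claim_changed_fullparen; decide

theorem fullparen_tight : Claim_exact_fullparen := by
  intro s _ hD
  rcases hD with h | h <;> subst h <;> decide
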